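-- pv_equiv track=rewrite | github.com/IKorn2/bumpix_bot | parser.py | _get_free_times_static
-- ===== SOURCE A (Python) =====
-- def _is_collide(start: int, end: int, blocks: list[list[int]]) -> list[int] | None:
--     """Перевіряє перетин інтервалу [start, end) з масивом блоків."""
--     for block in blocks:
--         if not (start >= block[1] or block[0] >= end):
--             return block
--     return None
--
-- def _get_free_times_static(
--     start_work: int,
--     end_work: int,
--     events: list[list[int]],
--     breaks: list[list[int]],
--     times_array: list[int],
--     need_minutes: int,
--     allow_last: bool,
-- ) -> list[int]:
--     """Обчислити вільні слоти у режимі статичних часів."""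
--     free = []
--     for current in times_array:
--         if current < start_work or current >= end_work:
--             continue
--         collide = _is_collide(current, current + need_minutes, events)
--         if not collide:
--             collide = _is_collide(current, current + need_minutes, breaks)
--         if not collide and current + need_minutes > end_work:
--             if not allow_last:
--                 collide = [0, end_work]
--         if not collide:
--             free.append(current)
--     return free
-- ===== SOURCE B (Python) =====
-- def _bisect_right(a, x):
--     # CPython's bisect_right loop, hand-written (no imports in this module)
--     lo, hi = 0, len(a)
--     while lo < hi:
--         mid = (lo + hi) // 2
--         if x < a[mid]:
--             hi = mid
--         else:
--             lo = mid + 1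
--     return lo
--
--
-- def _get_free_times_static(
--     start_work: int,
--     end_work: int,
--     events: list[list[int]],
--     breaks: list[list[int]],
--     times_array: list[int],
--     need_minutes: int,
--     allow_last: bool,
-- ) -> list[int]:
--     # A block [b0, b1] collides with [t, t+need) iff t < b1 and b0 < t+need,
--     # i.e. iff b0 - need + 1 <= t <= b1 - 1: precompute these forbidden
--     # intervals, sort them by start, keep a running max of the ends, and
--     # answer each candidate with one binary search.
--     iv = [(b[0] - need_minutes + 1, b[1] - 1) for b in events + breaks]
--     iv.sort(key=lambda p: p[0])
--     starts = [p[0] for p in iv]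
--     pref = []
--     for p in iv:
--         if pref:
--             pref.append(max(pref[-1], p[1]))
--         else:
--             pref.append(p[1])
--     free = []
--     for t in times_array:
--         if t < start_work or t >= end_work:
--             continue
--         if not allow_last and t + need_minutes > end_work:
--             continue
--         i = _bisect_right(starts, t)
--         if i > 0 and pref[i - 1] >= t:
--             continue
--         free.append(t)
--     return free
-- ===== Notes on version B (the rewrite author's own statement) =====
-- stated objective: alternative
-- what changed: Instead of rescanning every event and break for each candidate time, B converts each block once into the exact interval of forbidden candidates, sorts these intervals, keeps a running maximum of their ends, and decides each candidate with one binary search.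
-- outside the precondition, e.g. on _get_free_times_static(0, 10, [[0, 5], [3]], [], [2], 5, True): A returns [], B raises IndexError
import Mathlib
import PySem

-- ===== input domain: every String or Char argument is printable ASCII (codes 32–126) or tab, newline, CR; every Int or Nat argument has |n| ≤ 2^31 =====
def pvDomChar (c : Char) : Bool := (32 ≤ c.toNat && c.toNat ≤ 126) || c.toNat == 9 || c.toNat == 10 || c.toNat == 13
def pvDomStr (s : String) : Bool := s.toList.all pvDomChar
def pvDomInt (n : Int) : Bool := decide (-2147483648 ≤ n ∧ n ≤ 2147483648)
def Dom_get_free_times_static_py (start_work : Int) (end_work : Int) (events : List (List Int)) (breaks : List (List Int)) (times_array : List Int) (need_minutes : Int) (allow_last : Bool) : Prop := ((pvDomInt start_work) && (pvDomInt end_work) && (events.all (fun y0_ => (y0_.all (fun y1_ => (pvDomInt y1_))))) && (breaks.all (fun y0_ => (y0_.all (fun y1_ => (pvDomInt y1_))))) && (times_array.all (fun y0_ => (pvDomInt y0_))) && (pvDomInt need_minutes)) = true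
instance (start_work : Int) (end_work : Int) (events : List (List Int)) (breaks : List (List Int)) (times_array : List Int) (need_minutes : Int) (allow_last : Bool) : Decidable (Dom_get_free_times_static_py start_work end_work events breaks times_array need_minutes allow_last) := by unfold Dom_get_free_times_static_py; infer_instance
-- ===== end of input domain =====

-- B replaces A's per-candidate rescan of all blocks by precomputed forbidden intervals, sorted once,
-- with a running max of interval ends and one binary search per candidate (objective: alternative algorithm).

-- ===== PORT A =====
-- _is_collide: block[1] / block[0] are valid under Pre_ (every block has ≥ 2 entries);
-- the pyGetD default 0 is unreachable inside Pre_.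
def is_collide_py (start : Int) (end_ : Int) (blocks : List (List Int)) : Option (List Int) :=
  match blocks with
  | [] => none
  | block :: rest =>
    if ¬(start ≥ PySem.List.pyGetD block 1 0 ∨ PySem.List.pyGetD block 0 0 ≥ end_) then some block
    else is_collide_py start end_ rest

def get_free_times_static_py (start_work : Int) (end_work : Int) (events : List (List Int)) (breaks : List (List Int)) (times_array : List Int) (need_minutes : Int) (allow_last : Bool) : List Int :=
  times_array.foldl (fun free current =>
    if current < start_work ∨ current ≥ end_work then free
    else
      let collide := is_collide_py current (current + need_minutes) events
      let collide := if collide = none then is_collide_py current (current + need_minutes) breaks else collide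
      let collide := if collide = none ∧ current + need_minutes > end_work ∧ allow_last = false then some [0, end_work] else collide
      if collide = none then free ++ [current] else free) []

-- ===== PORT B =====
-- the running-max step of B's pref loop (the body of Source B's pref-building loop)
def prefStep (pref : List Int) (p : Int × Int) : List Int :=
  if pref ≠ [] then pref ++ [max (PySem.List.pyGetD pref (-1) 0) p.2] else pref ++ [p.2]

-- Source B's hand-written _bisect_right is exactly CPython's bisect_right loop; ported as
-- PySem.List.bisectRight (the same lo/hi/mid loop, exact).
def get_free_times_static_py_alt (start_work : Int) (end_work : Int) (events : List (List Int)) (breaks : List (List Int)) (times_array : List Int) (need_minutes : Int) (allow_last : Bool) : List Int :=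
  let iv := (events ++ breaks).map (fun b => (PySem.List.pyGetD b 0 0 - need_minutes + 1, PySem.List.pyGetD b 1 0 - 1))
  let ivs := PySem.List.sorted iv (fun p => p.1) false
  let starts := ivs.map (fun p => p.1)
  let pref := ivs.foldl prefStep ([] : List Int)
  times_array.foldl (fun free t =>
    if t < start_work ∨ t ≥ end_work then free
    else if allow_last = false ∧ t + need_minutes > end_work then free
    else
      let i := PySem.List.bisectRight starts t
      if 0 < i ∧ t ≤ PySem.List.pyGetD pref ((i : Int) - 1) 0 then free
      else free ++ [t]) []

-- ===== PRECONDITION & SPEC =====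
-- Pre_ excludes inputs containing a block with fewer than 2 entries: Python A raises IndexError on
-- such a block whenever it reaches it (it still returns when an earlier block already collides or no
-- candidate is in the working window — those returning inputs are excluded too; see claim cites).
def Pre_get_free_times_static_py (start_work : Int) (end_work : Int) (events : List (List Int)) (breaks : List (List Int)) (times_array : List Int) (need_minutes : Int) (allow_last : Bool) : Prop :=
  (∀ b ∈ events, 2 ≤ b.length) ∧ (∀ b ∈ breaks, 2 ≤ b.length)
instance (start_work : Int) (end_work : Int) (events : List (List Int)) (breaks : List (List Int)) (times_array : List Int) (need_minutes : Int) (allow_last : Bool) : Decidable (Pre_get_free_times_static_py start_work end_work events breaks times_array need_minutes allow_last) := by unfold Pre_get_free_times_static_py; infer_instance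

def pvWitness_get_free_times_static_py : Int × Int × List (List Int) × List (List Int) × List Int × Int × Bool :=
  (0, 100, [[10, 20]], [[30, 40]], [0, 10, 25, 50, 90], 15, false)

def Spec_get_free_times_static_py (start_work : Int) (end_work : Int) (events : List (List Int)) (breaks : List (List Int)) (times_array : List Int) (need_minutes : Int) (allow_last : Bool) (out : List Int) : Prop := out = get_free_times_static_py_alt start_work end_work events breaks times_array need_minutes allow_last
instance (start_work : Int) (end_work : Int) (events : List (List Int)) (breaks : List (List Int)) (times_array : List Int) (need_minutes : Int) (allow_last : Bool) (out : List Int) : Decidable (Spec_get_free_times_static_py start_work end_work events breaks times_array need_minutes allow_last out) := by unfold Spec_get_free_times_static_py; infer_instance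

-- ===== CLAIM (what is proved, stated in full; the proofs are below) =====
def Claim_equal_get_free_times_static_py : Prop := ∀ (start_work : Int) (end_work : Int) (events : List (List Int)) (breaks : List (List Int)) (times_array : List Int) (need_minutes : Int) (allow_last : Bool), Dom_get_free_times_static_py start_work end_work events breaks times_array need_minutes allow_last → Pre_get_free_times_static_py start_work end_work events breaks times_array need_minutes allow_last → Spec_get_free_times_static_py start_work end_work events breaks times_array need_minutes allow_last (get_free_times_static_py start_work end_work events breaks times_array need_minutes allow_last)

-- ===== LEMMAS AND PROOFS =====

-- "t is free" as a predicate on the candidate (blocks = events ++ breaks)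
def pvFree (start_work end_work need_minutes : Int) (allow_last : Bool) (blocks : List (List Int)) (t : Int) : Bool :=
  decide ((start_work ≤ t ∧ t < end_work) ∧
    (∀ b ∈ blocks, t ≥ PySem.List.pyGetD b 1 0 ∨ PySem.List.pyGetD b 0 0 ≥ t + need_minutes) ∧
    (t + need_minutes ≤ end_work ∨ allow_last = true))

lemma is_collide_eq_none_iff (s e : Int) (blocks : List (List Int)) :
    is_collide_py s e blocks = none ↔ ∀ b ∈ blocks, s ≥ PySem.List.pyGetD b 1 0 ∨ PySem.List.pyGetD b 0 0 ≥ e := by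
  induction blocks with
  | nil => simp [is_collide_py]
  | cons b rest ih =>
    by_cases h : s ≥ PySem.List.pyGetD b 1 0 ∨ PySem.List.pyGetD b 0 0 ≥ e <;>
      simp [is_collide_py, h, ih]

lemma portA_eq_filter (start_work end_work : Int) (events breaks : List (List Int)) (times_array : List Int) (need_minutes : Int) (allow_last : Bool) :
    get_free_times_static_py start_work end_work events breaks times_array need_minutes allow_last
      = times_array.filter (pvFree start_work end_work need_minutes allow_last (events ++ breaks)) := by
  unfold get_free_times_static_py
  have hbody : (fun (free : List Int) (current : Int) =>
      if current < start_work ∨ current ≥ end_work then free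
      else
        let collide := is_collide_py current (current + need_minutes) events
        let collide := if collide = none then is_collide_py current (current + need_minutes) breaks else collide
        let collide := if collide = none ∧ current + need_minutes > end_work ∧ allow_last = false then some [0, end_work] else collide
        if collide = none then free ++ [current] else free)
      = (fun free t => if pvFree start_work end_work need_minutes allow_last (events ++ breaks) t then free ++ [t] else free) := by
    funext acc t
    simp only [pvFree, decide_eq_true_eq]
    by_cases hr : t < start_work ∨ t ≥ end_work
    · rw [if_pos hr, if_neg]; rintro ⟨⟨h1, h2⟩, -⟩; omega
    · rw [if_neg hr]
      push Not at hr
      split_ifs with h1 h2 h3 h4 h5 <;>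
        simp_all [is_collide_eq_none_iff]
      · omega
      · rename_i hbr himp
        have hall : ∀ (b : List Int), b ∈ events ∨ b ∈ breaks → PySem.List.pyGetD b 1 0 ≤ t ∨ t + need_minutes ≤ PySem.List.pyGetD b 0 0 :=
          fun b hb => hb.elim (h1 b) (hbr b)
        have hc := himp hall
        exact absurd hc.2 (by simp [h2 hc.1])
  rw [hbody, PySem.List.foldl_append_if_eq_filter]
  rfl

lemma prefStep_length (acc : List Int) (p : Int × Int) : (prefStep acc p).length = acc.length + 1 := by
  unfold prefStep; split_ifs <;> simp

lemma prefFold_length (ivs : List (Int × Int)) : ∀ acc : List Int, (ivs.foldl prefStep acc).length = acc.length + ivs.length := by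
  induction ivs with
  | nil => intro acc; simp
  | cons p rest ih =>
    intro acc
    simp only [List.foldl_cons, ih, prefStep_length, List.length_cons]
    omega

-- the running-max value at index j is ≥ t iff some interval among the first j+1 ends at ≥ t
lemma pref_ge_iff (t : Int) (ivs : List (Int × Int)) :
    ∀ (j : Nat), j < ivs.length →
      (t ≤ (ivs.foldl prefStep []).getD j 0 ↔ ∃ k, k ≤ j ∧ ∃ hk : k < ivs.length, t ≤ ivs[k].2) := by
  induction ivs using List.reverseRecOn with
  | nil => intro j hj; simp at hj
  | append_singleton iv p ih =>
    intro j hj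
    rw [List.length_append, List.length_singleton] at hj
    by_cases hnil : iv = []
    · subst hnil
      simp only [List.length_nil, Nat.zero_add, Nat.lt_one_iff] at hj
      subst hj
      simp [prefStep]
    · rw [List.foldl_append, List.foldl_cons, List.foldl_nil]
      set L := iv.foldl prefStep [] with hLdef
      have hlen : L.length = iv.length := by simpa using prefFold_length iv []
      have hLne : L ≠ [] := by
        intro h; apply hnil; rw [h] at hlen; exact List.length_eq_zero_iff.mp hlen.symm
      by_cases hjlt : j < iv.length
      · have hstep : (prefStep L p).getD j 0 = L.getD j 0 := by
          unfold prefStep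
          rw [if_pos hLne, List.getD_append _ _ _ _ (by omega)]
        rw [hstep, ih j hjlt]
        constructor
        · rintro ⟨k, hk, hklt, hle⟩
          exact ⟨k, hk, by simp; omega, by rwa [List.getElem_append_left hklt]⟩
        · rintro ⟨k, hk, hklt, hle⟩
          have hklt' : k < iv.length := by omega
          exact ⟨k, hk, hklt', by rwa [List.getElem_append_left hklt'] at hle⟩
      · have hj' : j = iv.length := by omega
        subst hj'
        have hivlen : 0 < iv.length := List.length_pos_iff.mpr hnil
        have hstep : (prefStep L p).getD iv.length 0 = max (L.getLast hLne) p.2 := by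
          unfold prefStep
          rw [if_pos hLne, PySem.List.pyGetD_neg_one _ _ hLne, List.getD_append_right _ _ _ _ (by omega)]
          simp [hlen]
        rw [hstep, le_max_iff]
        have hlast : L.getLast hLne = L.getD (iv.length - 1) 0 := by
          have h1 : iv.length - 1 < L.length := by omega
          rw [List.getD_eq_getElem L 0 h1, List.getLast_eq_getElem]
          congr 1
          omega
        constructor
        · rintro (hL | hp)
          · rw [hlast] at hL
            obtain ⟨k, hk, hklt, hle⟩ := (ih (iv.length - 1) (by omega)).mp hL
            exact ⟨k, by omega, by simp; omega, by rwa [List.getElem_append_left hklt]⟩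
          · refine ⟨iv.length, le_refl _, by simp, ?_⟩
            rw [List.getElem_append_right (by omega)]
            simpa using hp
        · rintro ⟨k, hk, hklt, hle⟩
          by_cases hkiv : k < iv.length
          · left
            rw [hlast]
            exact (ih (iv.length - 1) (by omega)).mpr ⟨k, by omega, hkiv, by rwa [List.getElem_append_left hkiv] at hle⟩
          · right
            have hk' : k = iv.length := by omega
            subst hk'
            rw [List.getElem_append_right (by omega)] at hle
            simpa using hle

-- B's per-candidate test (binary search + prefix max) decides exactly "t lies in some forbidden interval"
lemma covered_iff (iv : List (Int × Int)) (t : Int) :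
    (0 < PySem.List.bisectRight ((PySem.List.sorted iv (fun p => p.1) false).map (fun p => p.1)) t ∧
      t ≤ PySem.List.pyGetD ((PySem.List.sorted iv (fun p => p.1) false).foldl prefStep [])
            ((PySem.List.bisectRight ((PySem.List.sorted iv (fun p => p.1) false).map (fun p => p.1)) t : Int) - 1) 0)
      ↔ ∃ p ∈ iv, p.1 ≤ t ∧ t ≤ p.2 := by
  have hpw : (List.map (fun p => p.1) (PySem.List.sorted iv (fun p => p.1) false)).Pairwise (· ≤ ·) :=
    PySem.List.sorted_map_key_pairwise iv (fun p => p.1)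
  have hspec := PySem.List.bisectRight_spec _ t hpw
  set ivs := PySem.List.sorted iv (fun p => p.1) false with hivs
  set starts := ivs.map (fun p => p.1) with hstarts
  set i := PySem.List.bisectRight starts t with hi
  have hslen : starts.length = ivs.length := by simp [hstarts]
  have hilen : ivs.length = iv.length := PySem.List.length_sorted _ _ _
  constructor
  · rintro ⟨hpos, hle⟩
    have hile : i ≤ starts.length := hspec.1
    have hi1 : i - 1 < ivs.length := by omega
    rw [show ((i : Int) - 1) = (((i - 1 : Nat) : Int)) by omega, PySem.List.pyGetD_natCast] at hle
    obtain ⟨k, hkle, hklt, hk2⟩ := (pref_ge_iff t ivs (i - 1) hi1).mp hle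
    have hks : starts[k]'(by omega) ≤ t := hspec.2.1 k (by omega) (by omega)
    have hkeq : starts[k]'(by omega) = (ivs[k]'hklt).1 := by simp [hstarts]
    refine ⟨ivs[k]'hklt, (PySem.List.mem_sorted _ _ _ _).mp (List.getElem_mem hklt), by omega, hk2⟩
  · rintro ⟨p, hp, h1, h2⟩
    obtain ⟨k, hklt0, hkeq0⟩ := List.getElem_of_mem ((PySem.List.mem_sorted iv (fun p => p.1) false p).mpr hp)
    have hklt : k < ivs.length := by rw [hivs]; exact hklt0
    have hkeq : ivs[k]'hklt = p := by simp only [hivs]; exact hkeq0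
    have hki : k < i := by
      by_contra hcon
      have hts : t < starts[k]'(by omega) := hspec.2.2 k (by omega) (by omega)
      have hsk : starts[k]'(by omega) = p.1 := by
        simp only [hstarts, List.getElem_map, hkeq]
      omega
    have hile : i ≤ starts.length := hspec.1
    refine ⟨by omega, ?_⟩
    rw [show ((i : Int) - 1) = (((i - 1 : Nat) : Int)) by omega, PySem.List.pyGetD_natCast]
    exact (pref_ge_iff t ivs (i - 1) (by omega)).mpr ⟨k, by omega, hklt, by rw [hkeq]; exact h2⟩

lemma portB_eq_filter (start_work end_work : Int) (events breaks : List (List Int)) (times_array : List Int) (need_minutes : Int) (allow_last : Bool) :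
    get_free_times_static_py_alt start_work end_work events breaks times_array need_minutes allow_last
      = times_array.filter (pvFree start_work end_work need_minutes allow_last (events ++ breaks)) := by
  unfold get_free_times_static_py_alt
  dsimp only
  have hcov := covered_iff ((events ++ breaks).map (fun b => (PySem.List.pyGetD b 0 0 - need_minutes + 1, PySem.List.pyGetD b 1 0 - 1)))
  have hbody : (fun (free : List Int) (t : Int) =>
      if t < start_work ∨ t ≥ end_work then free
      else if allow_last = false ∧ t + need_minutes > end_work then free
      else
        if 0 < PySem.List.bisectRight ((PySem.List.sorted ((events ++ breaks).map (fun b => (PySem.List.pyGetD b 0 0 - need_minutes + 1, PySem.List.pyGetD b 1 0 - 1))) (fun p => p.1) false).map (fun p => p.1)) t ∧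
            t ≤ PySem.List.pyGetD ((PySem.List.sorted ((events ++ breaks).map (fun b => (PySem.List.pyGetD b 0 0 - need_minutes + 1, PySem.List.pyGetD b 1 0 - 1))) (fun p => p.1) false).foldl prefStep [])
              ((PySem.List.bisectRight ((PySem.List.sorted ((events ++ breaks).map (fun b => (PySem.List.pyGetD b 0 0 - need_minutes + 1, PySem.List.pyGetD b 1 0 - 1))) (fun p => p.1) false).map (fun p => p.1)) t : Int) - 1) 0
        then free else free ++ [t])
      = (fun free t => if pvFree start_work end_work need_minutes allow_last (events ++ breaks) t then free ++ [t] else free) := by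
    funext acc t
    simp only [pvFree, decide_eq_true_eq]
    by_cases hr : t < start_work ∨ t ≥ end_work
    · rw [if_pos hr, if_neg]; rintro ⟨⟨h1, h2⟩, -⟩; omega
    · rw [if_neg hr]
      push Not at hr
      by_cases hal : allow_last = false ∧ t + need_minutes > end_work
      · rw [if_pos hal, if_neg]
        rintro ⟨-, -, h3 | h3⟩
        · omega
        · rw [h3] at hal; exact absurd hal.1 (by simp)
      · rw [if_neg hal]
        have hexists : (∃ p ∈ (events ++ breaks).map (fun b => (PySem.List.pyGetD b 0 0 - need_minutes + 1, PySem.List.pyGetD b 1 0 - 1)), p.1 ≤ t ∧ t ≤ p.2)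
            ↔ ¬(∀ b ∈ events ++ breaks, t ≥ PySem.List.pyGetD b 1 0 ∨ PySem.List.pyGetD b 0 0 ≥ t + need_minutes) := by
          simp only [List.mem_map]
          push Not
          constructor
          · rintro ⟨p, ⟨b, hb, rfl⟩, h1, h2⟩
            exact ⟨b, hb, by dsimp at h1 h2; omega⟩
          · rintro ⟨b, hb, h1, h2⟩
            exact ⟨_, ⟨b, hb, rfl⟩, by dsimp; omega⟩
        split_ifs with hc hf hf
        · exact absurd ((hcov t).mp hc) (by rw [hexists]; exact not_not_intro hf.2.1)
        · rfl
        · rfl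
        · exfalso
          apply hf
          refine ⟨⟨hr.1, hr.2⟩, ?_, ?_⟩
          · by_contra hall
            exact hc ((hcov t).mpr (hexists.mpr hall))
          · rcases Bool.eq_false_or_eq_true allow_last with hb | hb
            · right; exact hb
            · left
              rcases not_and_or.mp hal with h | h
              · exact absurd hb h
              · omega
  rw [hbody, PySem.List.foldl_append_if_eq_filter]
  rfl

-- ===== VERDICT (by name: the statement is the Claim_ definition above) =====
theorem get_free_times_static_py_spec : Claim_equal_get_free_times_static_py := by
  intro start_work end_work events breaks times_array need_minutes allow_last _ _
  unfold Spec_get_free_times_static_py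
  rw [portA_eq_filter, portB_eq_filter]
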